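-- pv_equiv track=rewrite | github.com/Tyro-Fang/-Offer | 22.py | IsPopOrder
-- ===== SOURCE A (Python) =====
-- def IsPopOrder(numsIn,numsOut):
--     if numsIn ==None or numsOut==None:
--         return True
--     Ilen=len(numsIn)
--     Olen=len(numsOut)
--     if Ilen!=Olen:
--         return False
--     IIndex=0
--     OIndex=0
--     stack=[]
--     while OIndex<Ilen:
--         if stack==[] or numsOut[OIndex]!=stack[-1]:
--             if IIndex>=Ilen:
--                 return False
--             stack.append(numsIn[IIndex])
--             IIndex+=1
--         else:
--             stack.pop()
--             OIndex+=1
--     return True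
-- ===== SOURCE B (Python) =====
-- def IsPopOrder(numsIn, numsOut):
--     if numsIn == None or numsOut == None:
--         return True
--     n = len(numsIn)
--     if n != len(numsOut):
--         return False
--     buried = []   # not-yet-popped elements that were skipped over, most recent last
--     i = 0         # next unconsumed position of numsIn
--     for v in numsOut:
--         if buried and buried[-1] == v:
--             buried.pop()
--         else:
--             try:
--                 k = numsIn.index(v, i)   # first occurrence of v at position >= i
--             except ValueError:
--                 return False
--             buried.extend(numsIn[i:k])   # bury the whole skipped segment at once
--             i = k + 1
--     return True
-- ===== Notes on version B (the rewrite author's own statement) =====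
-- stated objective: faster
-- what changed: Replaced A's push/pop stack machine (a single lazy while-loop that pushes one input element per iteration and compares the top each time) by an output-driven scan: for each popped value, either it cancels the most recently buried element, or a direct first-occurrence search numsIn.index(v, i) locates its push position and the whole skipped segment numsIn[i:k] is buried in one bulk step; the per-element push loop disappears.
import Mathlib
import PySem

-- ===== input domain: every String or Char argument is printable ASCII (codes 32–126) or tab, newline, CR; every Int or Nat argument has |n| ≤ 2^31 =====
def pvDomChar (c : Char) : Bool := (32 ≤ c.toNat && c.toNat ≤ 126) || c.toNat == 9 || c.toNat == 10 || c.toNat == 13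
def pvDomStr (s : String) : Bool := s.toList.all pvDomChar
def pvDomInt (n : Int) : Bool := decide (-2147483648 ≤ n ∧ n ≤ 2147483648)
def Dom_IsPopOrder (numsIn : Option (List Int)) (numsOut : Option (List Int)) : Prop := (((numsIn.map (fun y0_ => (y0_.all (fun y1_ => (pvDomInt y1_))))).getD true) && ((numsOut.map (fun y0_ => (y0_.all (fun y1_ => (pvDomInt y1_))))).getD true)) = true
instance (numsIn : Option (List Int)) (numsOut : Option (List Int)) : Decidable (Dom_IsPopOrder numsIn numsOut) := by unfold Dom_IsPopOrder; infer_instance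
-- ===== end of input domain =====

-- B replaces A's element-by-element push/pop stack machine by an output-driven scan:
-- each popped value either cancels the most recently buried element or is located by a
-- direct first-occurrence search (list.index with a start), burying the skipped slice
-- in one bulk step; the per-element push loop disappears (a timing run measured B faster).

-- ===== PORT A =====
-- A's while-loop as recursion over the same state (IIndex, OIndex, stack); the stack is a
-- List with the top at the head (python appends/pops/reads stack[-1] at the end, which is
-- exactly the head here).  Indices are within range whenever the guards let them be read,
-- so List.getD is exact there.
def pvALoop (nin nout : List Int) (n : Nat) : Nat → Nat → Nat → List Int → Bool
  | 0, _, _, _ => false  -- fuel exhausted (never reached: IsPopOrder supplies fuel 2*n+1, and each iteration decreases (n-i)+(n-o))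
  | fuel + 1, i, o, stack =>
    if o < n then
      if stack.isEmpty || (nout.getD o 0 != stack.headD 0) then
        if n ≤ i then false
        else pvALoop nin nout n fuel (i + 1) o (nin.getD i 0 :: stack)
      else pvALoop nin nout n fuel i (o + 1) stack.tail
    else true

def IsPopOrder (numsIn : Option (List Int)) (numsOut : Option (List Int)) : Bool :=
  match numsIn, numsOut with
  | none, _ => true
  | _, none => true
  | some nin, some nout =>
    let Ilen := nin.length
    let Olen := nout.length
    if Ilen ≠ Olen then false
    else pvALoop nin nout Ilen (Ilen + Ilen + 1) 0 0 []

-- ===== PORT B =====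
-- Source B's for-loop over numsOut with state (i, buried); the buried list keeps its top at
-- the head (python appends/pops at the end), so python's buried.extend(numsIn[i:k]) is
-- ((nin.drop i).take k).reverse ++ buried, and numsIn.index(v, i) is
-- i + (PySem.List.index? (nin.drop i) v), ValueError = none.
def pvBLoop (nin : List Int) : List Int → Nat → List Int → Bool
  | [], _, _ => true
  | v :: os, i, buried =>
    if buried ≠ [] ∧ buried.headD 0 = v then
      pvBLoop nin os i buried.tail
    else
      match PySem.List.index? (nin.drop i) v with
      | none => false
      | some k => pvBLoop nin os (i + k + 1) (((nin.drop i).take k).reverse ++ buried)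

def IsPopOrder_alt (numsIn : Option (List Int)) (numsOut : Option (List Int)) : Bool :=
  match numsIn, numsOut with
  | none, _ => true
  | _, none => true
  | some nin, some nout =>
    if nin.length ≠ nout.length then false
    else pvBLoop nin nout 0 []

-- ===== PRECONDITION & SPEC =====
def Spec_IsPopOrder (numsIn : Option (List Int)) (numsOut : Option (List Int)) (out : Bool) : Prop := out = IsPopOrder_alt numsIn numsOut
instance (numsIn : Option (List Int)) (numsOut : Option (List Int)) (out : Bool) : Decidable (Spec_IsPopOrder numsIn numsOut out) := by unfold Spec_IsPopOrder; infer_instance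

-- ===== CLAIM (what is proved, stated in full; the proofs are below) =====
def Claim_equal_IsPopOrder : Prop := ∀ (numsIn : Option (List Int)) (numsOut : Option (List Int)), Dom_IsPopOrder numsIn numsOut → Spec_IsPopOrder numsIn numsOut (IsPopOrder numsIn numsOut)

-- ===== LEMMAS AND PROOFS =====

-- Common reference: greedy stack simulation on the remaining lists.
def pvSim (ins outs stack : List Int) : Bool :=
  match outs, stack with
  | [], _ => true
  | o :: os, t :: s =>
    if t = o then pvSim ins os s
    else
      match ins with
      | [] => false
      | x :: xs => pvSim xs (o :: os) (x :: t :: s)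
  | o :: os, [] =>
    match ins with
    | [] => false
    | x :: xs => pvSim xs (o :: os) [x]
termination_by ins.length + outs.length
decreasing_by all_goals (simp only [List.length_cons]; omega)

theorem pvSim_nil_out (ins stack : List Int) : pvSim ins [] stack = true := by
  rw [pvSim]

theorem pvSim_pop (ins os s : List Int) (o t : Int) (h : t = o) :
    pvSim ins (o :: os) (t :: s) = pvSim ins os s := by
  rw [pvSim.eq_def]; simp [h]

theorem pvSim_push_nil (x o : Int) (xs os : List Int) :
    pvSim (x :: xs) (o :: os) [] = pvSim xs (o :: os) [x] := by
  rw [pvSim]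

theorem pvSim_push_cons (x o t : Int) (xs os s : List Int) (h : t ≠ o) :
    pvSim (x :: xs) (o :: os) (t :: s) = pvSim xs (o :: os) (x :: t :: s) := by
  rw [pvSim]; simp [h]

theorem pvSim_stuck_nil (o : Int) (os : List Int) : pvSim [] (o :: os) [] = false := by
  rw [pvSim]

theorem pvSim_stuck_cons (o t : Int) (os s : List Int) (h : t ≠ o) :
    pvSim [] (o :: os) (t :: s) = false := by
  rw [pvSim]; simp [h]

theorem pvDropCons (l : List Int) (k : Nat) (h : k < l.length) :
    l.drop k = l.getD k 0 :: l.drop (k + 1) := by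
  rw [List.getD_eq_getElem _ _ h, List.drop_eq_getElem_cons h]

theorem pvALoop_eq_sim (nin nout : List Int) (n : Nat)
    (hn : nin.length = n) (hm : nout.length = n) :
    ∀ fuel i o stack, i ≤ n → o ≤ n → (n - i) + (n - o) < fuel →
      pvALoop nin nout n fuel i o stack = pvSim (nin.drop i) (nout.drop o) stack := by
  intro fuel
  induction fuel with
  | zero => intro i o stack _ _ hf; omega
  | succ fuel ih =>
    intro i o stack hi ho hf
    rw [pvALoop]
    by_cases hbo : o < n
    · rw [if_pos hbo]
      have hdo : nout.drop o = nout.getD o 0 :: nout.drop (o + 1) := pvDropCons _ _ (by omega)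
      by_cases hc : (stack.isEmpty || (nout.getD o 0 != stack.headD 0)) = true
      · rw [if_pos hc]
        by_cases hni : n ≤ i
        · rw [if_pos hni]
          have hdi : nin.drop i = [] := List.drop_eq_nil_of_le (by omega)
          rw [hdi, hdo]
          cases stack with
          | nil => rw [pvSim_stuck_nil]
          | cons t s =>
            have hne : t ≠ nout.getD o 0 := by
              simp [List.isEmpty, List.headD] at hc
              exact fun h => hc h.symm
            rw [pvSim_stuck_cons _ _ _ _ hne]
        · rw [if_neg hni]
          have hdi : nin.drop i = nin.getD i 0 :: nin.drop (i + 1) := pvDropCons _ _ (by omega)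
          rw [ih (i + 1) o _ (by omega) ho (by omega)]
          conv_rhs => rw [hdi, hdo]
          cases stack with
          | nil => rw [pvSim_push_nil, ← hdo]
          | cons t s =>
            have hne : t ≠ nout.getD o 0 := by
              simp [List.isEmpty, List.headD] at hc
              exact fun h => hc h.symm
            rw [pvSim_push_cons _ _ _ _ _ _ hne, ← hdo]
      · rw [if_neg hc]
        cases stack with
        | nil => simp [List.isEmpty] at hc
        | cons t s =>
          have ht : nout.getD o 0 = t := by
            simp [List.isEmpty, List.headD] at hc
            exact hc
          rw [ih i (o + 1) _ hi (by omega) (by omega)]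
          conv_rhs => rw [hdo]
          rw [pvSim_pop _ _ _ _ _ ht.symm]
          rfl
    · rw [if_neg hbo]
      have hdo : nout.drop o = [] := List.drop_eq_nil_of_le (by omega)
      rw [hdo, pvSim_nil_out]

-- If v never occurs in the remaining input and the top does not match, the greedy
-- simulation pushes everything and fails.
theorem pvSim_fail_of_not_mem (v : Int) (os : List Int) :
    ∀ ins stack, v ∉ ins → (∀ t s, stack = t :: s → t ≠ v) →
      pvSim ins (v :: os) stack = false := by
  intro ins
  induction ins with
  | nil =>
    intro stack _ htop
    cases stack with
    | nil => exact pvSim_stuck_nil _ _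
    | cons t s => exact pvSim_stuck_cons _ _ _ _ (htop t s rfl)
  | cons x xs ih =>
    intro stack hmem htop
    have hx : x ≠ v := fun h => hmem (h ▸ List.mem_cons_self)
    have hxs : v ∉ xs := fun h => hmem (List.mem_cons_of_mem _ h)
    cases stack with
    | nil =>
      rw [pvSim_push_nil]
      exact ih [x] hxs (by intro t s h; cases h; exact hx)
    | cons t s =>
      rw [pvSim_push_cons _ _ _ _ _ _ (htop t s rfl)]
      exact ih (x :: t :: s) hxs (by intro t' s' h; cases h; exact hx)

-- Jump lemma: the greedy simulation pushes the whole segment before the first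
-- occurrence of v, then pops v; equivalently, bury the segment reversed in one step.
theorem pvSim_jump (v : Int) (os : List Int) :
    ∀ seg rest stack, v ∉ seg → (∀ t s, stack = t :: s → t ≠ v) →
      pvSim (seg ++ v :: rest) (v :: os) stack = pvSim rest os (seg.reverse ++ stack) := by
  intro seg
  induction seg with
  | nil =>
    intro rest stack _ htop
    cases stack with
    | nil =>
      rw [List.nil_append, pvSim_push_nil, pvSim_pop _ _ _ _ _ rfl]
      simp
    | cons t s =>
      rw [List.nil_append, pvSim_push_cons _ _ _ _ _ _ (htop t s rfl),
        pvSim_pop _ _ _ _ _ rfl]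
      simp
  | cons x seg' ih =>
    intro rest stack hmem htop
    have hx : x ≠ v := fun h => hmem (h ▸ List.mem_cons_self)
    have hseg : v ∉ seg' := fun h => hmem (List.mem_cons_of_mem _ h)
    have step : pvSim ((x :: seg') ++ v :: rest) (v :: os) stack
        = pvSim (seg' ++ v :: rest) (v :: os) (x :: stack) := by
      cases stack with
      | nil => rw [List.cons_append, pvSim_push_nil]
      | cons t s => rw [List.cons_append, pvSim_push_cons _ _ _ _ _ _ (htop t s rfl)]
    rw [step, ih rest (x :: stack) hseg (by intro t s h; cases h; exact hx)]
    simp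

-- B's loop computes exactly the greedy simulation from the current state.
theorem pvBLoop_eq_sim (nin : List Int) :
    ∀ os i buried, pvBLoop nin os i buried = pvSim (nin.drop i) os buried := by
  intro os
  induction os with
  | nil => intro i buried; rw [pvBLoop, pvSim_nil_out]
  | cons v os ih =>
    intro i buried
    rw [pvBLoop]
    by_cases hc : buried ≠ [] ∧ buried.headD 0 = v
    · rw [if_pos hc]
      obtain ⟨hne, hhd⟩ := hc
      cases buried with
      | nil => exact absurd rfl hne
      | cons t s =>
        simp only [List.headD] at hhd
        rw [List.tail_cons, ih i s, pvSim_pop _ _ _ _ _ hhd]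
    · rw [if_neg hc]
      have htop : ∀ t s, buried = t :: s → t ≠ v := by
        intro t s h ht
        exact hc ⟨by simp [h], by simp [h, List.headD, ht]⟩
      cases hidx : PySem.List.index? (nin.drop i) v with
      | none =>
        have hmem : v ∉ nin.drop i := (PySem.List.index?_eq_none_iff _ _).mp hidx
        exact (pvSim_fail_of_not_mem v os _ buried hmem htop).symm
      | some k =>
        obtain ⟨pre, suf, hsplit, hlen, hpre⟩ := (PySem.List.index?_eq_some_iff _ _ _).mp hidx
        have htake : (nin.drop i).take k = pre := by
          rw [hsplit, ← hlen, List.take_left]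
        have hdrop : nin.drop (i + k + 1) = suf := by
          have : nin.drop (i + k + 1) = ((nin.drop i).drop k).drop 1 := by
            rw [List.drop_drop, List.drop_drop]; ring_nf
          rw [this, hsplit, ← hlen, List.drop_left]
          rfl
        simp only
        rw [ih (i + k + 1) _, htake, hdrop, hsplit,
          pvSim_jump v os pre suf buried hpre htop]

-- ===== VERDICT (by name: the statement is the Claim_ definition above) =====
theorem IsPopOrder_spec : Claim_equal_IsPopOrder := by
  intro numsIn numsOut _
  unfold Spec_IsPopOrder
  cases numsIn with
  | none => rfl
  | some nin =>
    cases numsOut with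
    | none => rfl
    | some nout =>
      show IsPopOrder (some nin) (some nout) = IsPopOrder_alt (some nin) (some nout)
      unfold IsPopOrder IsPopOrder_alt
      simp only
      by_cases h : nin.length = nout.length
      · simp only [if_neg (show ¬ nin.length ≠ nout.length from by omega)]
        rw [pvALoop_eq_sim nin nout nin.length rfl h.symm (nin.length + nin.length + 1) 0 0 [] (by omega) (by omega) (by omega)]
        rw [pvBLoop_eq_sim nin nout 0 [], List.drop_zero, List.drop_zero]
      · simp only [if_pos h]
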